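-- pv_equiv track=rewrite | github.com/Dipanshi/DSA-Python | 4. Prefix Sum/Major Problem Categories/Subarray Sum/6.Make Sum Divisible by P.py | min_subarray_to_remove
-- ===== SOURCE A (Python) =====
-- def min_subarray_to_remove(nums, p):
--     total = sum(nums)
--     target= total%p
--     if target==0:
--         return 0
--     min_lenght= len(nums)
--     count_index={0:-1}
--     prefix_sum=0
--     for i,num in enumerate(nums):
--         prefix_sum+=num
--         current= prefix_sum%p
--         needed = (current-target+p)%p
--         if needed in count_index:
--             min_lenght= min(min_lenght,i-count_index[needed])
--         count_index[current]=i
--     return min_lenght if min_lenght<len(nums) else -1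
-- ===== SOURCE B (Python) =====
-- def min_subarray_to_remove(nums, p):
--     total = sum(nums)
--     target = total % p
--     if target == 0:
--         return 0
--     n = len(nums)
--     prefixes = [0]
--     for num in nums:
--         prefixes.append(prefixes[-1] + num)
--     best = n
--     for i in range(n):
--         needed = (prefixes[i + 1] % p - target) % p
--         for j in range(i - 1, -2, -1):
--             if prefixes[j + 1] % p == needed:
--                 best = min(best, i - j)
--                 break
--     return best if best < n else -1
-- ===== Notes on version B (the rewrite author's own statement) =====
-- stated objective: alternative
-- what changed: Replaces A's one-pass remainder->last-index hashmap with a precomputed prefix-sum array and, for each end index, a backward scan for the nearest prefix with the matching remainder (no dict).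
import Mathlib
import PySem

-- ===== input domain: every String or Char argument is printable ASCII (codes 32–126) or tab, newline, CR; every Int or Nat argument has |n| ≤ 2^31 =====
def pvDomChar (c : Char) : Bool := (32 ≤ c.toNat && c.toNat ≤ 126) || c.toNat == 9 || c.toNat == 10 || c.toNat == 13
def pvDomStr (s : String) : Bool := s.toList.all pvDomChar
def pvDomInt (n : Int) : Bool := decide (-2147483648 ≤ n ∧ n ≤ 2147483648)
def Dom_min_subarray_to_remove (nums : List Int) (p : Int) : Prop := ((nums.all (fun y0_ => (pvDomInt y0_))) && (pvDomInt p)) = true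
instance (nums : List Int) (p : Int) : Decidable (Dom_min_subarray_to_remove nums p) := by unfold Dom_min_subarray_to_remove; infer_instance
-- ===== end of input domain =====

-- B replaces A's remainder→last-index hashmap with a precomputed prefix-sum array and a
-- backward inner scan for the nearest matching prefix (no dict); objective: alternative.


-- ===== PORT A =====
def min_subarray_to_remove (nums : List Int) (p : Int) : Int :=
  let total := nums.sum
  let target := PySem.Int.mod total p
  if target == 0 then 0
  else
    let st := (PySem.List.enumerate nums 0).foldl
      (fun (st : Int × PySem.Dict Int Int × Int) pr =>
        let prefix_sum := st.2.2 + pr.2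
        let current := PySem.Int.mod prefix_sum p
        let needed := PySem.Int.mod (current - target + p) p
        let minL := match st.2.1.get? needed with
          | some j => min st.1 (pr.1 - j)
          | none => st.1
        (minL, st.2.1.insert current pr.1, prefix_sum))
      ((nums.length : Int), PySem.Dict.ofList [((0 : Int), (-1 : Int))], 0)
    if st.1 < (nums.length : Int) then st.1 else -1

-- ===== PORT B =====
def min_subarray_to_remove_alt (nums : List Int) (p : Int) : Int :=
  let total := nums.sum
  let target := PySem.Int.mod total p
  if target == 0 then 0
  else
    let n : Int := nums.length
    let prefixes := nums.foldl (fun acc num => acc ++ [PySem.List.pyGetD acc (-1) 0 + num]) [(0 : Int)]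
    let best := (PySem.List.pyRange 0 n 1).foldl
      (fun b i =>
        let needed := PySem.Int.mod (PySem.Int.mod (PySem.List.pyGetD prefixes (i + 1) 0) p - target) p
        match (PySem.List.pyRange (i - 1) (-2) (-1)).find?
            (fun j => PySem.Int.mod (PySem.List.pyGetD prefixes (j + 1) 0) p == needed) with
        | some j => min b (i - j)
        | none => b)
      n
    if best < n then best else -1

-- ===== PRECONDITION & SPEC =====
-- Pre_ excludes exactly p = 0, on which Python's '%' raises ZeroDivisionError (in both A and B).
def Pre_min_subarray_to_remove (nums : List Int) (p : Int) : Prop := p ≠ 0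
instance (nums : List Int) (p : Int) : Decidable (Pre_min_subarray_to_remove nums p) := by unfold Pre_min_subarray_to_remove; infer_instance
def pvWitness_min_subarray_to_remove : List Int × Int := ([1, 2, 3], 3)
def Spec_min_subarray_to_remove (nums : List Int) (p : Int) (out : Int) : Prop := out = min_subarray_to_remove_alt nums p
instance (nums : List Int) (p : Int) (out : Int) : Decidable (Spec_min_subarray_to_remove nums p out) := by unfold Spec_min_subarray_to_remove; infer_instance

-- ===== CLAIM (what is proved, stated in full; the proofs are below) =====
def Claim_equal_min_subarray_to_remove : Prop := ∀ (nums : List Int) (p : Int), Dom_min_subarray_to_remove nums p → Pre_min_subarray_to_remove nums p → Spec_min_subarray_to_remove nums p (min_subarray_to_remove nums p)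

-- ===== LEMMAS AND PROOFS =====

-- Python's mod is periodic in the dividend.
theorem pymod_add_right (a p : Int) (hp : p ≠ 0) : PySem.Int.mod (a + p) p = PySem.Int.mod a p := by
  have h1 := PySem.Int.floordiv_mul_add_mod (a + p) p
  have h2 := PySem.Int.floordiv_mul_add_mod a p
  have hd : p ∣ (PySem.Int.mod (a + p) p - PySem.Int.mod a p) :=
    ⟨PySem.Int.floordiv a p - PySem.Int.floordiv (a + p) p + 1, by linarith [h1, h2]⟩
  rcases lt_trichotomy p 0 with h | h | h
  · have b1 := PySem.Int.mod_neg_bounds (a + p) h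
    have b2 := PySem.Int.mod_neg_bounds a h
    have := Int.eq_zero_of_abs_lt_dvd (neg_dvd.mpr hd) (abs_lt.mpr ⟨by omega, by omega⟩)
    omega
  · omega
  · have b1l := PySem.Int.mod_nonneg (a + p) h
    have b1r := PySem.Int.mod_lt (a + p) h
    have b2l := PySem.Int.mod_nonneg a h
    have b2r := PySem.Int.mod_lt a h
    have := Int.eq_zero_of_abs_lt_dvd hd (abs_lt.mpr ⟨by omega, by omega⟩)
    omega

theorem pymod_zero (p : Int) : PySem.Int.mod 0 p = 0 :=
  (PySem.Int.mod_eq_zero_iff_dvd 0 p).mpr (dvd_zero p)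

theorem pvFind?_congr {α : Type} (l : List α) (f g : α → Bool) (h : ∀ x ∈ l, f x = g x) :
    l.find? f = l.find? g := by
  induction l with
  | nil => rfl
  | cons a t ih =>
    simp only [List.find?_cons]
    rw [h a (List.mem_cons_self)]
    cases g a <;> simp [ih (fun x hx => h x (List.mem_cons_of_mem _ hx))]

-- prefix sum at Int position t (t = number of leading elements summed)
def pvPref (nums : List Int) (t : Int) : Int := (nums.take t.toNat).sum

-- latest j ∈ [-1, k-1] whose prefix sum of the first j+1 elements has remainder r
def pvLast (nums : List Int) (p k r : Int) : Option Int :=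
  (PySem.List.pyRange (k - 1) (-2) (-1)).find?
    (fun j => PySem.Int.mod (pvPref nums (j + 1)) p == r)

theorem pvLast_zero (nums : List Int) (p r : Int) :
    pvLast nums p 0 r = if (0 : Int) == r then some (-1) else none := by
  unfold pvLast
  rw [show (0 : Int) - 1 = -1 by ring, PySem.List.pyRange_neg_one_cons (by omega),
      PySem.List.pyRange_neg_one_eq_nil (by omega)]
  simp [List.find?, pvPref, pymod_zero]
  split <;> simp_all

theorem pvLast_succ (nums : List Int) (p k r : Int) (hk : 0 ≤ k) :
    pvLast nums p (k + 1) r =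
      if PySem.Int.mod (pvPref nums (k + 1)) p == r then some k else pvLast nums p k r := by
  unfold pvLast
  rw [show k + 1 - 1 = k by ring, PySem.List.pyRange_neg_one_cons (by omega)]
  by_cases h : PySem.Int.mod (pvPref nums (k + 1)) p == r <;> simp [List.find?, h]

-- the prefixes list B builds is the map of prefix sums over range (n+1)
theorem pvPrefixes_spec (nums : List Int) :
    nums.foldl (fun acc num => acc ++ [PySem.List.pyGetD acc (-1) 0 + num]) [(0 : Int)]
      = (List.range (nums.length + 1)).map (fun t => (nums.take t).sum) := by
  induction nums using List.reverseRecOn with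
  | nil => simp
  | append_singleton xs x ih =>
    rw [List.foldl_append, ih]
    simp only [List.foldl_cons, List.foldl_nil, List.length_append, List.length_cons,
      List.length_nil, Nat.zero_add]
    rw [List.range_succ (n := xs.length + 1), List.map_append]
    congr 1
    · refine (List.map_congr_left fun t ht => ?_).symm
      rw [List.take_append_of_le_length (by simpa using Nat.lt_succ_iff.mp (List.mem_range.mp ht))]
    · rw [List.range_succ (n := xs.length), List.map_append]
      simp only [List.map_cons, List.map_nil]
      rw [show PySem.List.pyGetD (((List.range xs.length).map fun t => (xs.take t).sum) ++ [(xs.take xs.length).sum]) (-1) 0 = (xs.take xs.length).sum from by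
        simp [PySem.List.pyGetD, PySem.List.pyGet?_neg_one_append_singleton]]
      rw [List.take_length, List.take_of_length_le (by simp)]
      simp

theorem pvPrefixes_get (nums : List Int) (t : Int) (h0 : 0 ≤ t) (h1 : t ≤ (nums.length : Int)) :
    PySem.List.pyGetD ((List.range (nums.length + 1)).map (fun t => (nums.take t).sum)) t 0
      = pvPref nums t := by
  have ht : t.toNat < nums.length + 1 := by omega
  rw [PySem.List.pyGetD, PySem.List.pyGet?_of_nonneg _ h0]
  simp [ht, pvPref]

-- lockstep: A's dict loop and B's scan loop compute the same running minimum
theorem pvLockstep' (p target : Int) (hp : p ≠ 0) (nums : List Int)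
    (rest done : List Int) (h : nums = done ++ rest)
    (d : PySem.Dict Int Int) (hd : ∀ r, d.get? r = pvLast nums p (done.length : Int) r)
    (m : Int) :
    ((PySem.List.enumerate rest (done.length : Int)).foldl
      (fun (st : Int × PySem.Dict Int Int × Int) pr =>
        let prefix_sum := st.2.2 + pr.2
        let current := PySem.Int.mod prefix_sum p
        let needed := PySem.Int.mod (current - target + p) p
        let minL := match st.2.1.get? needed with
          | some j => min st.1 (pr.1 - j)
          | none => st.1
        (minL, st.2.1.insert current pr.1, prefix_sum))
      (m, d, done.sum)).1
    = (PySem.List.pyRange (done.length : Int) (nums.length : Int) 1).foldl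
      (fun b i =>
        let needed := PySem.Int.mod (PySem.Int.mod (pvPref nums (i + 1)) p - target) p
        match (PySem.List.pyRange (i - 1) (-2) (-1)).find?
            (fun j => PySem.Int.mod (pvPref nums (j + 1)) p == needed) with
        | some j => min b (i - j)
        | none => b)
      m := by
  induction rest generalizing done d m with
  | nil =>
    subst h
    rw [PySem.List.pyRange_one_eq_nil (by simp)]
    simp [PySem.List.enumerate]
  | cons x rest' ih =>
    have hlen : (done.length : Int) < (nums.length : Int) := by
      subst h; simp
    have hpref : pvPref nums ((done.length : Int) + 1) = done.sum + x := by
      subst h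
      unfold pvPref
      rw [show (((done.length : Int)) + 1).toNat = done.length + 1 by omega]
      rw [List.take_append]
      simp [List.take_of_length_le (by omega : done.length ≤ done.length + 1)]
    rw [PySem.List.enumerate_cons, List.foldl_cons,
        PySem.List.pyRange_one_cons hlen, List.foldl_cons]
    simp only []
    rw [pymod_add_right _ p hp, ← hpref, hd, pvLast]
    have hsum : pvPref nums ((done.length : Int) + 1) = (done ++ [x]).sum := by
      rw [hpref]; simp
    have hc : (((done ++ [x]).length : Int)) = (done.length : Int) + 1 := by simp
    have hd' : ∀ r, (d.insert (PySem.Int.mod ((done ++ [x]).sum) p) ((done.length : Int))).get? r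
        = pvLast nums p (((done ++ [x]).length : Int)) r := by
      intro r
      rw [hc, pvLast_succ nums p _ r (by positivity), hsum, PySem.Dict.get?_insert]
      have hx : (done ++ [x]).sum = done.sum + x := by simp
      simp only [hx, beq_iff_eq]
      by_cases hr : r = PySem.Int.mod (done.sum + x) p
      · simp [hr]
      · rw [if_neg hr, if_neg (fun hh => hr hh.symm), hd]
    rw [hsum, ← hc]
    exact ih _ (by simp [h]) _ hd' _

-- ===== VERDICT (by name: the statement is the Claim_ definition above) =====
theorem min_subarray_to_remove_spec : Claim_equal_min_subarray_to_remove := by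
  intro nums p _ hp
  unfold Spec_min_subarray_to_remove min_subarray_to_remove min_subarray_to_remove_alt
  simp only [pvPrefixes_spec]
  split
  next h => rfl
  next h =>
    have hd0 : ∀ r, (PySem.Dict.ofList [((0 : Int), (-1 : Int))]).get? r
        = pvLast nums p ((List.length ([] : List Int) : Int)) r := by
      intro r
      rw [show ((List.length ([] : List Int)) : Int) = 0 by simp, pvLast_zero]
      rw [show PySem.Dict.ofList [((0 : Int), (-1 : Int))] = PySem.Dict.empty.insert 0 (-1) from rfl,
          PySem.Dict.get?_insert]
      by_cases hr : r = (0 : Int)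
      · simp [hr]
      · simp only [if_neg hr, PySem.Dict.get?_empty]; simp [Ne.symm hr]
    have key := pvLockstep' p (PySem.Int.mod nums.sum p) hp nums nums [] (by simp)
      (PySem.Dict.ofList [((0 : Int), (-1 : Int))]) hd0 ((nums.length : Int))
    simp only [List.length_nil, Nat.cast_zero, List.sum_nil] at key
    rw [key]
    have hB : (PySem.List.pyRange 0 ((nums.length : Int)) 1).foldl
        (fun b i =>
          let needed := PySem.Int.mod (PySem.Int.mod (pvPref nums (i + 1)) p - PySem.Int.mod nums.sum p) p
          match (PySem.List.pyRange (i - 1) (-2) (-1)).find?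
              (fun j => PySem.Int.mod (pvPref nums (j + 1)) p == needed) with
          | some j => min b (i - j)
          | none => b) ((nums.length : Int))
      = (PySem.List.pyRange 0 ((nums.length : Int)) 1).foldl
        (fun b i =>
          let needed := PySem.Int.mod (PySem.Int.mod (PySem.List.pyGetD ((List.range (nums.length + 1)).map (fun t => (nums.take t).sum)) (i + 1) 0) p - PySem.Int.mod nums.sum p) p
          match (PySem.List.pyRange (i - 1) (-2) (-1)).find?
              (fun j => PySem.Int.mod (PySem.List.pyGetD ((List.range (nums.length + 1)).map (fun t => (nums.take t).sum)) (j + 1) 0) p == needed) with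
          | some j => min b (i - j)
          | none => b) ((nums.length : Int)) := by
      apply PySem.List.foldl_congr_mem
      intro b i hi
      have hib := (PySem.List.mem_pyRange_one).mp hi
      rw [pvPrefixes_get nums (i + 1) (by omega) (by omega)]
      simp only []
      congr 1
      apply pvFind?_congr
      intro j hj
      have hjb := (PySem.List.mem_pyRange_neg_one).mp hj
      rw [pvPrefixes_get nums (j + 1) (by omega) (by omega)]
    rw [hB]
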